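-- pv_equiv track=rewrite | github.com/gtmc-dev/Articles | _scripts/frontmatter.py | merge_frontmatter
-- ===== SOURCE A (Python) =====
-- def merge_frontmatter(template: dict, existing: dict) -> tuple[dict, int]:
--     merged = template.copy()
--     added_count = 0
--     for key, value in template.items():
--         if key not in existing:
--             merged[key] = value
--             added_count += 1
--         else:
--             merged[key] = existing[key]
--     return merged, added_count
-- ===== SOURCE B (Python) =====
-- def merge_frontmatter(template: dict, existing: dict) -> tuple[dict, int]:
--     added_count = len(template.keys() - existing.keys())
--     merged = {**template, **{k: existing[k] for k in existing if k in template}}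
--     return merged, added_count
-- ===== Notes on version B (the rewrite author's own statement) =====
-- stated objective: alternative
-- what changed: Replaced A's single interleaved count-and-merge loop by two independent passes: the added-key count computed as the set difference of the key views, and the merged dict built by dict-unpacking template with a comprehension of existing's values at template keys.
import Mathlib
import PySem

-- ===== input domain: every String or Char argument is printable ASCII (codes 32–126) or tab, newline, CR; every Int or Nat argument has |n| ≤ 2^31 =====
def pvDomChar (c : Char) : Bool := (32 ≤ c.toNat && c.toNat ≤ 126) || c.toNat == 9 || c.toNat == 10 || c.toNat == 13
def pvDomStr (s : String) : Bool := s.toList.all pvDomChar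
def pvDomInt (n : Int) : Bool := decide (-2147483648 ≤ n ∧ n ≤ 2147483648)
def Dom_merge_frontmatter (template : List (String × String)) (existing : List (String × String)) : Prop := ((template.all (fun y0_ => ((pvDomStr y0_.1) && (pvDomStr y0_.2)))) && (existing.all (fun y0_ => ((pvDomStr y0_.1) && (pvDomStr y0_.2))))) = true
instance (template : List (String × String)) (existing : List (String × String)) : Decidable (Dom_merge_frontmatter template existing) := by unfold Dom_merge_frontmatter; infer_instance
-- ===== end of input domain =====

-- B replaces A's single interleaved count-and-merge loop by two separate passes:
-- a set-difference count of the new keys, and an overlay of existing's relevant values onto template.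


-- ===== PORT A =====
-- merged = template.copy(); for key, value in template.items(): if key not in existing: merged[key]=value; added+=1 else merged[key]=existing[key]
def merge_frontmatter (template : List (String × String)) (existing : List (String × String)) : (List (String × String)) × Int :=
  let td := PySem.Dict.ofList template
  let ed := PySem.Dict.ofList existing
  let r := td.items.foldl
    (fun (st : PySem.Dict String String × Int) kv =>
      if !(ed.contains kv.1) then (st.1.insert kv.1 kv.2, st.2 + 1)
      else (st.1.insert kv.1 (ed.getD kv.1 ""), st.2))
    (td, 0)
  (r.1.items, r.2)

-- ===== PORT B =====
-- added_count = len(template.keys() - existing.keys())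
-- merged = {**template, **{k: existing[k] for k in existing if k in template}}
def merge_frontmatter_alt (template : List (String × String)) (existing : List (String × String)) : (List (String × String)) × Int :=
  let td := PySem.Dict.ofList template
  let ed := PySem.Dict.ofList existing
  let added : Int := PySem.Set.len (PySem.Set.diff (PySem.Set.ofList td.keys) ed.keys)
  let overlay := ed.items.filter (fun kv => td.contains kv.1)
  let merged := td.update overlay
  (merged.items, added)

-- ===== PRECONDITION & SPEC =====
def Spec_merge_frontmatter (template : List (String × String)) (existing : List (String × String)) (out : (List (String × String)) × Int) : Prop := out = merge_frontmatter_alt template existing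
instance (template : List (String × String)) (existing : List (String × String)) (out : (List (String × String)) × Int) : Decidable (Spec_merge_frontmatter template existing out) := by unfold Spec_merge_frontmatter; infer_instance

-- ===== CLAIM (what is proved, stated in full; the proofs are below) =====
def Claim_equal_merge_frontmatter : Prop := ∀ (template : List (String × String)) (existing : List (String × String)), Dom_merge_frontmatter template existing → Spec_merge_frontmatter template existing (merge_frontmatter template existing)

-- ===== LEMMAS AND PROOFS =====

-- A's loop state splits: the dict component is an insert-fold, the counter counts template keys absent from existing.
lemma pv_foldA_split (ed : PySem.Dict String String) (l : List (String × String)) :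
    ∀ (d : PySem.Dict String String) (c : Int),
    l.foldl
      (fun (st : PySem.Dict String String × Int) kv =>
        if !(ed.contains kv.1) then (st.1.insert kv.1 kv.2, st.2 + 1)
        else (st.1.insert kv.1 (ed.getD kv.1 ""), st.2))
      (d, c)
    = (l.foldl (fun acc p => acc.insert p.1 (if ed.contains p.1 then ed.getD p.1 "" else p.2)) d,
       c + (l.countP (fun p => !(ed.contains p.1)) : Int)) := by
  induction l with
  | nil => intro d c; simp
  | cons p l ih =>
    intro d c
    by_cases h : ed.contains p.1 = true
    · have e1 : List.foldl
          (fun (st : PySem.Dict String String × Int) kv =>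
            if !(ed.contains kv.1) then (st.1.insert kv.1 kv.2, st.2 + 1)
            else (st.1.insert kv.1 (ed.getD kv.1 ""), st.2))
          (d, c) (p :: l)
          = List.foldl
          (fun (st : PySem.Dict String String × Int) kv =>
            if !(ed.contains kv.1) then (st.1.insert kv.1 kv.2, st.2 + 1)
            else (st.1.insert kv.1 (ed.getD kv.1 ""), st.2))
          (d.insert p.1 (ed.getD p.1 ""), c) l := by
        rw [List.foldl_cons]
        congr 1
        simp [h]
      rw [e1, ih]
      conv_rhs => rw [List.foldl_cons]
      rw [List.countP_cons]
      simp [h]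
    · simp only [Bool.not_eq_true] at h
      have e1 : List.foldl
          (fun (st : PySem.Dict String String × Int) kv =>
            if !(ed.contains kv.1) then (st.1.insert kv.1 kv.2, st.2 + 1)
            else (st.1.insert kv.1 (ed.getD kv.1 ""), st.2))
          (d, c) (p :: l)
          = List.foldl
          (fun (st : PySem.Dict String String × Int) kv =>
            if !(ed.contains kv.1) then (st.1.insert kv.1 kv.2, st.2 + 1)
            else (st.1.insert kv.1 (ed.getD kv.1 ""), st.2))
          (d.insert p.1 p.2, c + 1) l := by
        rw [List.foldl_cons]
        congr 1
        simp [h]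
      rw [e1, ih]
      conv_rhs => rw [List.foldl_cons]
      rw [List.countP_cons]
      simp [h]
      ring

-- inserting a list of already-present, pairwise-distinct keys rewrites each item by first-match lookup in that list
lemma pv_items_update_of_contains (l : List (String × String)) :
    ∀ (d : PySem.Dict String String),
    (l.map Prod.fst).Nodup → (∀ p ∈ l, d.contains p.1 = true) →
    (l.foldl (fun acc p => acc.insert p.1 p.2) d).items
    = d.items.map (fun q => match (PySem.Dict.mk l).get? q.1 with | some v => (q.1, v) | none => q) := by
  induction l with
  | nil =>
    intro d _ _
    simp [PySem.Dict.get?]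
  | cons p l ih =>
    intro d hnd hc
    have hcp : d.contains p.1 = true := hc p (List.mem_cons_self ..)
    have hstep : (d.insert p.1 p.2).items
        = d.items.map (fun q => if q.1 == p.1 then (p.1, p.2) else q) :=
      by rw [PySem.Dict.items_insert_of_contains d p.2 hcp]
    have hc' : ∀ q ∈ l, (d.insert p.1 p.2).contains q.1 = true := by
      intro q hq
      rw [PySem.Dict.contains_insert]
      simp [hc q (List.mem_cons_of_mem _ hq)]
    rw [List.map_cons, List.nodup_cons] at hnd
    have hnd' := hnd.2
    have hpnotin := hnd.1
    rw [List.foldl_cons, ih (d.insert p.1 p.2) hnd' hc', hstep, List.map_map]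
    apply List.map_congr_left
    intro q _
    simp only [Function.comp]
    by_cases hqk : q.1 = p.1
    · have hb : (q.1 == p.1) = true := by simp [hqk]
      have hnone : (PySem.Dict.mk l).get? p.1 = none := by
        rw [PySem.Dict.get?_eq_none_iff_not_mem_keys]
        simpa [PySem.Dict.keys] using hpnotin
      simp only [hb, if_pos]
      rw [PySem.Dict.get?_mk_cons]
      simp [hnone, hqk]
    · have hb : (q.1 == p.1) = false := by simp [hqk]
      simp only [hb, Bool.false_eq_true, if_false]
      rw [PySem.Dict.get?_mk_cons]
      have : (p.1 == q.1) = false := by simp [Ne.symm hqk]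
      simp [this]

-- lookup of a member's key in a key-preserving remap of a Nodup-key list
lemma pv_get?_mk_map (f : String × String → String) (q : String × String) (l : List (String × String)) :
    (l.map Prod.fst).Nodup → q ∈ l →
    (PySem.Dict.mk (l.map (fun p => (p.1, f p)))).get? q.1 = some (f q) := by
  induction l with
  | nil => simp
  | cons p l ih =>
    intro hnd hq
    simp only [List.map_cons, PySem.Dict.get?_mk_cons]
    rcases List.mem_cons.mp hq with h | h
    · subst h; simp
    · have hne : (p.1 == q.1) = false := by
        have : q.1 ∈ l.map Prod.fst := List.mem_map_of_mem h
        have := (List.nodup_cons.mp hnd).1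
        simp only [beq_eq_false_iff_ne]
        intro hk; exact this (hk ▸ ‹q.1 ∈ l.map Prod.fst›)
      simp only [hne]
      exact ih (List.nodup_cons.mp hnd).2 h

-- filtering by a key predicate that holds at k does not change lookup at k
lemma pv_get?_mk_filter_key (P : String → Bool) (l : List (String × String)) (k : String) (hP : P k = true) :
    (PySem.Dict.mk (l.filter (fun p => P p.1))).get? k = (PySem.Dict.mk l).get? k := by
  induction l with
  | nil => rfl
  | cons p l ih =>
    by_cases h : P p.1 = true
    · rw [show List.filter (fun p => P p.1) (p :: l) = p :: List.filter (fun p => P p.1) l from List.filter_cons_of_pos h,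
          PySem.Dict.get?_mk_cons, PySem.Dict.get?_mk_cons, ih]
    · rw [show List.filter (fun p => P p.1) (p :: l) = List.filter (fun p => P p.1) l from List.filter_cons_of_neg (by simp [h]),
          ih, PySem.Dict.get?_mk_cons]
      have hpk : (p.1 == k) = false := by
        by_cases hk : p.1 = k
        · exact absurd (hk ▸ hP) (by simp [h])
        · simp [hk]
      simp [hpk]

lemma pv_get?_eq_ite (d : PySem.Dict String String) (k : String) :
    d.get? k = if d.contains k then some (d.getD k "") else none := by
  rw [PySem.Dict.contains_eq_isSome_get?, PySem.Dict.getD_eq_get?_getD]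
  cases d.get? k <;> simp


lemma pv_main (template existing : List (String × String)) :
    merge_frontmatter template existing = merge_frontmatter_alt template existing := by
  simp only [merge_frontmatter, merge_frontmatter_alt]
  set td := PySem.Dict.ofList template with htd
  set ed := PySem.Dict.ofList existing with hed
  have hndk : td.keys.Nodup := PySem.Dict.nodup_keys_ofList template
  have hnde : ed.keys.Nodup := PySem.Dict.nodup_keys_ofList existing
  have hcontains : ∀ q ∈ td.items, td.contains q.1 = true := by
    intro q hq
    simp only [PySem.Dict.contains, List.any_eq_true]
    exact ⟨q, hq, by simp⟩
  rw [pv_foldA_split]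
  have hA : (td.items.foldl
      (fun acc p => acc.insert p.1 (if ed.contains p.1 then ed.getD p.1 "" else p.2)) td).items
      = td.items.map (fun q => (q.1, if ed.contains q.1 then ed.getD q.1 "" else q.2)) := by
    have hfm : (td.items.map (fun p : String × String =>
          (p.1, if ed.contains p.1 then ed.getD p.1 "" else p.2))).foldl
          (fun acc p => acc.insert p.1 p.2) td
        = td.items.foldl
          (fun acc p => acc.insert p.1 (if ed.contains p.1 then ed.getD p.1 "" else p.2)) td :=
      List.foldl_map ..
    rw [← hfm, pv_items_update_of_contains]
    · apply List.map_congr_left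
      intro q hq
      rw [pv_get?_mk_map (fun p => if ed.contains p.1 then ed.getD p.1 "" else p.2) q td.items
            (by simpa [PySem.Dict.keys] using hndk) hq]
    · simpa [PySem.Dict.keys, List.map_map, Function.comp] using hndk
    · intro p hp
      rcases List.mem_map.mp hp with ⟨q, hq, rfl⟩
      exact hcontains q hq
  have hB : (td.update (ed.items.filter (fun kv => td.contains kv.1))).items
      = td.items.map (fun q => (q.1, if ed.contains q.1 then ed.getD q.1 "" else q.2)) := by
    show ((ed.items.filter (fun kv => td.contains kv.1)).foldl
        (fun acc p => acc.insert p.1 p.2) td).items = _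
    rw [pv_items_update_of_contains]
    · apply List.map_congr_left
      intro q hq
      rw [pv_get?_mk_filter_key (fun k => td.contains k) ed.items q.1 (hcontains q hq)]
      have heta : PySem.Dict.mk ed.items = ed := rfl
      rw [heta, pv_get?_eq_ite]
      by_cases h : ed.contains q.1 = true
      · simp [h]
      · simp only [Bool.not_eq_true] at h
        simp [h]
    · have hsub : ((ed.items.filter (fun kv => td.contains kv.1)).map Prod.fst).Sublist ed.keys :=
        List.Sublist.map Prod.fst List.filter_sublist
      exact hsub.nodup hnde
    · intro p hp
      exact (List.mem_filter.mp hp).2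
  rw [hA, hB]
  refine congrArg₂ Prod.mk rfl ?_
  have hset : PySem.Set.ofList td.keys = td.keys := PySem.Set.ofList_eq_self_of_nodup td.keys hndk
  simp only [PySem.Set.len, PySem.Set.diff, hset]
  rw [zero_add]
  congr 1
  rw [List.countP_eq_length_filter]
  have hfm : td.keys.filter (fun x => !PySem.Set.contains ed.keys x)
      = (td.items.filter (fun p => !ed.contains p.1)).map Prod.fst := by
    show (td.items.map Prod.fst).filter (fun x => !PySem.Set.contains ed.keys x) = _
    rw [List.filter_map]
    congr 1
    apply List.filter_congr
    intro p _
    simp only [Function.comp]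
    congr 1
    rw [PySem.Set.contains_eq_listContains, PySem.Dict.contains_eq_decide_mem_keys,
        List.contains_eq_mem]
  rw [hfm, List.length_map]

-- ===== VERDICT (by name: the statement is the Claim_ definition above) =====
theorem merge_frontmatter_spec : Claim_equal_merge_frontmatter := by
  intro template existing _
  exact pv_main template existing
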